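-- pv_equiv track=rewrite | github.com/pitt-miskov-zivanov-lab/BioRECIPE | translators/REACH_TRIPS_TO_BE_CLEANED/translatorFunctions.py | endWithChar
-- ===== SOURCE A (Python) =====
-- def endWithChar(string):
--     chars = ['a','b','c','d','e','f','g','h','i','j','k','l','m','n','o','p',
--              'q','r','s','t','u','v','w','x','y','z',
--              'A', 'B', 'C', 'D', 'E', 'F', 'G', 'H', 'I', 'J', 'K', 'L',
--              'M', 'N', 'O', 'P', 'Q', 'R', 'S', 'T', 'U', 'V', 'W', 'X', 'Y', 'Z',
--              '0', '1', '2', '3', '4', '5', '6', '7', '8', '9',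
--              '-', '_', '/', '\\', '.', ',']
--
--     for i in range(len(string)):
--         if string[i] not in (chars):
--             return string[:i]
--     return string
-- ===== SOURCE B (Python) =====
-- _ALLOWED = frozenset(
--     "abcdefghijklmnopqrstuvwxyz"
--     "ABCDEFGHIJKLMNOPQRSTUVWXYZ"
--     "0123456789-_/\\.,")
--
-- def endWithChar(string):
--     out = []
--     for ch in string:
--         if ch not in _ALLOWED:
--             break
--         out.append(ch)
--     return ''.join(out)
-- ===== Notes on version B (the rewrite author's own statement) =====
-- stated objective: idiomatic
-- what changed: B builds the allowed prefix character by character with a break against a precomputed frozenset (a take-while), instead of A's index loop that tests membership in a 66-element list and returns a slice string[:i].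
import Mathlib
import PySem

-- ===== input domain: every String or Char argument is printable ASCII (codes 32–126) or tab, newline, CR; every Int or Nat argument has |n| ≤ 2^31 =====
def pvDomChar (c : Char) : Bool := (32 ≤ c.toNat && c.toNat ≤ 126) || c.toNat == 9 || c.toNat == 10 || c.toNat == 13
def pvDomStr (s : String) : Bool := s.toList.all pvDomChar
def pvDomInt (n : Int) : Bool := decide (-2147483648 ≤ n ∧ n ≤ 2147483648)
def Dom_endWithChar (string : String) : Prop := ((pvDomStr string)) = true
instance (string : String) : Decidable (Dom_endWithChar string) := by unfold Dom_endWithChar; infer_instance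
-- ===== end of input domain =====

-- B replaces A's index scan + slice with an idiomatic take-while that builds the allowed prefix and stops at the first disallowed character.


-- ===== PORT A =====
-- A's 'chars' list, in A's order
def pvCharsA : List Char :=
  ['a','b','c','d','e','f','g','h','i','j','k','l','m','n','o','p',
   'q','r','s','t','u','v','w','x','y','z',
   'A','B','C','D','E','F','G','H','I','J','K','L',
   'M','N','O','P','Q','R','S','T','U','V','W','X','Y','Z',
   '0','1','2','3','4','5','6','7','8','9',
   '-','_','/','\\','.',',']

-- the 'for i in range(len(string))' loop with its early return string[:i];
-- s[i] is in range whenever the loop body runs, so the indexed access is exact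
def endWithCharGo (s : List Char) (i : Nat) : List Char :=
  if h : i < s.length then
    if s[i] ∈ pvCharsA then endWithCharGo s (i + 1)
    else PySem.List.slice s none (some (i : Int))
  else s
termination_by s.length - i

def endWithChar (string : String) : String :=
  String.mk (endWithCharGo string.toList 0)

-- ===== PORT B =====
-- B's _ALLOWED set (same 66 characters, written as a string constant)
def pvAllowedB : List Char :=
  "abcdefghijklmnopqrstuvwxyzABCDEFGHIJKLMNOPQRSTUVWXYZ0123456789-_/\\.,".toList

-- B's loop: append each allowed character, break at the first disallowed one
def endWithCharAltGo : List Char → List Char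
  | [] => []
  | c :: rest => if c ∈ pvAllowedB then c :: endWithCharAltGo rest else []

def endWithChar_alt (string : String) : String :=
  String.mk (endWithCharAltGo string.toList)

-- ===== PRECONDITION & SPEC =====
def Spec_endWithChar (string : String) (out : String) : Prop := out = endWithChar_alt string
instance (string : String) (out : String) : Decidable (Spec_endWithChar string out) := by unfold Spec_endWithChar; infer_instance

-- ===== CLAIM (what is proved, stated in full; the proofs are below) =====
def Claim_equal_endWithChar : Prop := ∀ (string : String), Dom_endWithChar string → Spec_endWithChar string (endWithChar string)

-- ===== LEMMAS AND PROOFS =====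

theorem pvChars_eq : pvCharsA = pvAllowedB := by decide

theorem go_eq (s : List Char) (i : Nat) :
    endWithCharGo s i = s.take i ++ endWithCharAltGo (s.drop i) := by
  induction hn : s.length - i using Nat.strong_induction_on generalizing i with
  | _ n ih =>
    unfold endWithCharGo
    split
    · rename_i h
      have hd : s.drop i = s[i] :: s.drop (i + 1) := List.drop_eq_getElem_cons h
      split
      · rename_i hmem
        rw [ih (s.length - (i + 1)) (by omega) (i + 1) rfl, hd]
        have : s.take (i + 1) = s.take i ++ [s[i]] := List.take_succ_eq_append_getElem h
        rw [this, endWithCharAltGo, if_pos (pvChars_eq ▸ hmem), List.append_assoc]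
        rfl
      · rename_i hmem
        rw [hd, endWithCharAltGo, if_neg (fun hc => hmem (pvChars_eq ▸ hc))]
        rw [PySem.List.slice_to_natCast]
        simp
    · rename_i h
      have : s.length ≤ i := by omega
      simp [List.take_of_length_le this, List.drop_of_length_le this, endWithCharAltGo]

-- ===== VERDICT (by name: the statement is the Claim_ definition above) =====
theorem endWithChar_spec : Claim_equal_endWithChar := by
  intro s _
  unfold Spec_endWithChar endWithChar endWithChar_alt
  rw [go_eq]
  simp
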